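-- pv_equiv track=rewrite | github.com/defin85/command-center-1c | orchestrator/apps/operations/ibcmd_catalog_v2/parser.py | _split_common_param_variants
-- ===== SOURCE A (Python) =====
-- def _split_common_param_variants(cell: str) -> list[str]:
--     tokens = [t for t in str(cell or "").split() if t]
--     variants: list[str] = []
--     current: list[str] = []
--     for tok in tokens:
--         if tok.startswith("-"):
--             if current:
--                 variants.append(" ".join(current))
--             current = [tok]
--             continue
--         if current:
--             current.append(tok)
--     if current:
--         variants.append(" ".join(current))
--     return variants
-- ===== SOURCE B (Python) =====
-- def _split_common_param_variants(cell: str) -> list[str]: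
--     tokens = str(cell or "").split()
--     n = len(tokens)
--     variants: list[str] = []
--     i = 0
--     while i < n:
--         if tokens[i].startswith("-"):
--             j = i + 1
--             while j < n and not tokens[j].startswith("-"):
--                 j += 1
--             variants.append(" ".join(tokens[i:j]))
--             i = j
--         else:
--             i += 1
--     return variants
-- ===== Notes on version B (the rewrite author's own statement) =====
-- stated objective: alternative
-- what changed: Replaces A's single forward pass with mutable (variants, current) accumulator state by an index-based scan that locates each dash token, advances an inner cursor to the end of its group, and emits the slice tokens[i:j] joined in one step (no pending-group state, no trailing flush).
import Mathlib
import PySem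

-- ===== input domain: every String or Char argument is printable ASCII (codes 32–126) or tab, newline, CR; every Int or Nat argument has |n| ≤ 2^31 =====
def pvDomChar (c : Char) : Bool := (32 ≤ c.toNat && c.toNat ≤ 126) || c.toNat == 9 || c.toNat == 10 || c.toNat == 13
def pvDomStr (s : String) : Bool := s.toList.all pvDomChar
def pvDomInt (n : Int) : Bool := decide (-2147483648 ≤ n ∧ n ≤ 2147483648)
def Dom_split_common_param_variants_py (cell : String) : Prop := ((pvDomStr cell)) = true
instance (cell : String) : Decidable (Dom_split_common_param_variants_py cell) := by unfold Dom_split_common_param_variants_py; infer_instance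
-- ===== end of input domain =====

-- B replaces A's stateful accumulator pass by an index scan that slices out each dash-led group directly; alternative decomposition, same cost.

-- ===== PORT A =====
-- tokens = [t for t in str(cell or "").split() if t]; then one pass keeping (variants, current), flushing current at each dash and at the end.
def split_common_param_variants_py (cell : String) : List String :=
  let tokens := (PySem.Str.split₀ (if cell == "" then "" else cell)).filter (fun t => t != "")
  let res := tokens.foldl (fun (st : List String × List String) tok =>
    if PySem.Str.startswith tok "-" then
      ((if st.2 ≠ [] then st.1 ++ [PySem.Str.join " " st.2] else st.1), [tok])
    else
      (st.1, if st.2 ≠ [] then st.2 ++ [tok] else st.2)) ([], [])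
  if res.2 ≠ [] then res.1 ++ [PySem.Str.join " " res.2] else res.1

-- ===== PORT B =====
-- inner while loop of Source B: advance j while j < n and tokens[j] does not start with '-'
-- (j < n = tokens.length throughout, so getD never takes its default)
def pvBInner (tokens : List String) (n j : Nat) : Nat :=
  if h : j < n ∧ ¬ PySem.Str.startswith (tokens.getD j "") "-" then
    pvBInner tokens n (j + 1)
  else j
termination_by n - j
decreasing_by omega

theorem pvBInner_ge (tokens : List String) (n j : Nat) : j ≤ pvBInner tokens n j := by
  unfold pvBInner
  split
  · exact le_trans (Nat.le_succ j) (pvBInner_ge tokens n (j + 1))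
  · exact le_refl j
termination_by n - j
decreasing_by rename_i h; omega

-- outer while loop of Source B
def pvBOuter (tokens : List String) (n i : Nat) (variants : List String) : List String :=
  if h : i < n then
    if PySem.Str.startswith (tokens.getD i "") "-" then
      let j := pvBInner tokens n (i + 1)
      pvBOuter tokens n j (variants ++ [PySem.Str.join " " (PySem.List.slice tokens (some (i : Int)) (some (j : Int)))])
    else
      pvBOuter tokens n (i + 1) variants
  else variants
termination_by n - i
decreasing_by
  · have := pvBInner_ge tokens n (i + 1); omega
  · omega

def split_common_param_variants_py_alt (cell : String) : List String :=
  let tokens := PySem.Str.split₀ (if cell == "" then "" else cell)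
  pvBOuter tokens tokens.length 0 []

-- ===== PRECONDITION & SPEC =====
def Spec_split_common_param_variants_py (cell : String) (out : List String) : Prop := out = split_common_param_variants_py_alt cell
instance (cell : String) (out : List String) : Decidable (Spec_split_common_param_variants_py cell out) := by unfold Spec_split_common_param_variants_py; infer_instance

-- ===== CLAIM (what is proved, stated in full; the proofs are below) =====
def Claim_equal_split_common_param_variants_py : Prop := ∀ (cell : String), Dom_split_common_param_variants_py cell → Spec_split_common_param_variants_py cell (split_common_param_variants_py cell)

-- ===== LEMMAS AND PROOFS =====

-- reference decomposition both ports are reduced to: groups of tokens, each led by a dash token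
def pvNondash (u : String) : Bool := !PySem.Str.startswith u "-"

def pvGroups : List String → List String
  | [] => []
  | t :: ts =>
    if PySem.Str.startswith t "-" then
      PySem.Str.join " " (t :: ts.takeWhile pvNondash) ::
        pvGroups (ts.dropWhile pvNondash)
    else pvGroups ts
termination_by ts => ts.length
decreasing_by
  · have := List.length_dropWhile_le pvNondash ts
    simp; omega
  · simp

-- A's loop step and final flush, named for the proofs (definitionally equal to the port's inline code)
def pvStep (st : List String × List String) (tok : String) : List String × List String :=
  if PySem.Str.startswith tok "-" then
    ((if st.2 ≠ [] then st.1 ++ [PySem.Str.join " " st.2] else st.1), [tok])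
  else
    (st.1, if st.2 ≠ [] then st.2 ++ [tok] else st.2)

def pvFinal (p : List String × List String) : List String :=
  if p.2 ≠ [] then p.1 ++ [PySem.Str.join " " p.2] else p.1

-- Python's whitespace split never produces an empty token
theorem pvGo_ne_nil (s : List Char) (cur : List Char) (acc : List (List Char))
    (hacc : ∀ w ∈ acc, w ≠ []) :
    ∀ w ∈ PySem.Chars.split₀.go s cur acc, w ≠ [] := by
  induction s generalizing cur acc with
  | nil =>
    unfold PySem.Chars.split₀.go
    split
    · simpa using hacc
    · rename_i hcur
      intro w hw
      simp only [List.mem_reverse, List.mem_cons] at hw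
      rcases hw with h | h
      · subst h; simp only [ne_eq, List.reverse_eq_nil_iff]
        simpa [List.isEmpty_iff] using hcur
      · exact hacc w h
  | cons c rest ih =>
    unfold PySem.Chars.split₀.go
    split
    · split
      · exact ih [] acc hacc
      · rename_i hcur
        refine ih [] (cur.reverse :: acc) ?_
        intro w hw
        rcases List.mem_cons.mp hw with h | h
        · subst h; simp only [ne_eq, List.reverse_eq_nil_iff]
          simpa [List.isEmpty_iff] using hcur
        · exact hacc w h
    · exact ih (c :: cur) acc hacc

theorem pvSplit₀_mem_ne (s : String) : ∀ t ∈ PySem.Str.split₀ s, t ≠ "" := by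
  intro t ht
  simp only [PySem.Str.split₀, List.mem_map] at ht
  obtain ⟨w, hw, rfl⟩ := ht
  have hne : w ≠ [] := pvGo_ne_nil s.toList [] [] (by simp) w hw
  intro hcon
  apply hne
  have := congrArg String.toList hcon
  simpa using this

theorem pvFilter_split (s : String) :
    (PySem.Str.split₀ s).filter (fun t => t != "") = PySem.Str.split₀ s := by
  refine List.filter_eq_self.mpr ?_
  intro t ht
  simpa using pvSplit₀_mem_ne s t ht

-- A's fold with a pending nonempty group equals: close the group at the next dash (or the end), then continue
theorem pvFoldA_nonempty (toks : List String) (vs cur : List String) (h : cur ≠ []) :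
    pvFinal (toks.foldl pvStep (vs, cur)) =
      vs ++ (PySem.Str.join " " (cur ++ toks.takeWhile pvNondash) :: pvGroups (toks.dropWhile pvNondash)) := by
  induction toks generalizing vs cur with
  | nil => simp [pvFinal, pvGroups, h]
  | cons t ts ih =>
    cases hd : PySem.Str.startswith t "-" with
    | true =>
      have hdC : PySem.Chars.startswith t.toList ['-'] = true := by simpa using hd
      have h1 : pvNondash t = false := by unfold pvNondash; rw [hd]; rfl
      have hstep : pvStep (vs, cur) t = (vs ++ [PySem.Str.join " " cur], [t]) := by
        simp [pvStep, hdC, h]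
      rw [List.foldl_cons, hstep, ih _ [t] (by simp)]
      simp [h1, pvGroups, hdC]
    | false =>
      have h1 : pvNondash t = true := by unfold pvNondash; rw [hd]; rfl
      have hdC : PySem.Chars.startswith t.toList ['-'] = false := by simpa using hd
      have hstep : pvStep (vs, cur) t = (vs, cur ++ [t]) := by
        simp [pvStep, hdC, h]
      rw [List.foldl_cons, hstep, ih _ (cur ++ [t]) (by simp)]
      simp [h1]

-- A's fold from the empty pending group computes pvGroups
theorem pvFoldA_empty (toks : List String) (vs : List String) :
    pvFinal (toks.foldl pvStep (vs, [])) = vs ++ pvGroups toks := by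
  induction toks generalizing vs with
  | nil => simp [pvFinal, pvGroups]
  | cons t ts ih =>
    cases hd : PySem.Str.startswith t "-" with
    | true =>
      have hdC : PySem.Chars.startswith t.toList ['-'] = true := by simpa using hd
      have hstep : pvStep (vs, []) t = (vs, [t]) := by simp [pvStep, hdC]
      rw [List.foldl_cons, hstep, pvFoldA_nonempty ts vs [t] (by simp)]
      simp [pvGroups, hdC]
    | false =>
      have hdC : PySem.Chars.startswith t.toList ['-'] = false := by simpa using hd
      have hstep : pvStep (vs, []) t = (vs, []) := by simp [pvStep, hdC]
      rw [List.foldl_cons, hstep, ih vs]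
      simp [pvGroups, hdC]

-- take/drop at the takeWhile boundary (no such named lemmas in Mathlib; proved here)
theorem pvTakeLen {α : Type} (p : α → Bool) (l : List α) :
    l.take (l.takeWhile p).length = l.takeWhile p := by
  induction l with
  | nil => rfl
  | cons a l ih =>
    cases hp : p a with
    | true => simp [hp, ih]
    | false => simp [hp]

theorem pvDropLen {α : Type} (p : α → Bool) (l : List α) :
    l.drop (l.takeWhile p).length = l.dropWhile p := by
  induction l with
  | nil => rfl
  | cons a l ih =>
    cases hp : p a with
    | true => simp [hp, ih]
    | false => simp [hp]

-- Source B's inner while loop measures the takeWhile run of non-dash tokens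
theorem pvBInner_eq (tokens : List String) (j : Nat) :
    pvBInner tokens tokens.length j = j + ((tokens.drop j).takeWhile pvNondash).length := by
  unfold pvBInner
  split
  · rename_i h
    obtain ⟨hj, hnd⟩ := h
    rw [pvBInner_eq tokens (j + 1)]
    have hdrop : tokens.drop j = tokens[j] :: tokens.drop (j + 1) := List.drop_eq_getElem_cons hj
    have hget : tokens.getD j "" = tokens[j] := List.getD_eq_getElem tokens "" hj
    have h1 : pvNondash tokens[j] = true := by
      unfold pvNondash; rw [← hget, Bool.eq_false_iff.mpr hnd]; rfl
    rw [hdrop, List.takeWhile_cons, h1]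
    simp; omega
  · rename_i h
    rcases Nat.lt_or_ge j tokens.length with hj | hj
    · have hnd : PySem.Str.startswith (tokens.getD j "") "-" = true := by
        by_contra hc
        exact h ⟨hj, fun hc2 => hc hc2⟩
      have hdrop : tokens.drop j = tokens[j] :: tokens.drop (j + 1) := List.drop_eq_getElem_cons hj
      have hget : tokens.getD j "" = tokens[j] := List.getD_eq_getElem tokens "" hj
      have h1 : pvNondash tokens[j] = false := by
        unfold pvNondash; rw [← hget, hnd]; rfl
      rw [hdrop, List.takeWhile_cons, h1]
      simp
    · rw [List.drop_eq_nil_of_le hj]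
      simp
termination_by tokens.length - j
decreasing_by rename_i h; omega

-- Source B's outer loop emits pvGroups of the remaining suffix
theorem pvBOuter_eq (tokens : List String) (i : Nat) (vs : List String) :
    pvBOuter tokens tokens.length i vs = vs ++ pvGroups (tokens.drop i) := by
  unfold pvBOuter
  split
  · rename_i hi
    have hdrop : tokens.drop i = tokens[i] :: tokens.drop (i + 1) := List.drop_eq_getElem_cons hi
    have hget : tokens.getD i "" = tokens[i] := List.getD_eq_getElem tokens "" hi
    split
    · rename_i hd
      have hd' : PySem.Str.startswith tokens[i] "-" = true := by rw [← hget]; exact hd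
      rw [pvBOuter_eq]
      have hj : pvBInner tokens tokens.length (i + 1)
          = i + 1 + ((tokens.drop (i + 1)).takeWhile pvNondash).length :=
        pvBInner_eq tokens (i + 1)
      have hslice : PySem.List.slice tokens (some (i : Int))
            (some ((pvBInner tokens tokens.length (i + 1) : Nat) : Int))
          = tokens[i] :: (tokens.drop (i + 1)).takeWhile pvNondash := by
        rw [PySem.List.slice_natCast, hj, hdrop]
        have : i + 1 + ((tokens.drop (i + 1)).takeWhile pvNondash).length - i
            = ((tokens.drop (i + 1)).takeWhile pvNondash).length + 1 := by omega
        rw [this, List.take_succ_cons]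
        congr 1
        exact pvTakeLen pvNondash (tokens.drop (i + 1))
      have hdropj : tokens.drop (pvBInner tokens tokens.length (i + 1))
          = (tokens.drop (i + 1)).dropWhile pvNondash := by
        rw [hj, ← List.drop_drop]
        exact pvDropLen pvNondash (tokens.drop (i + 1))
      rw [hslice, hdropj, hdrop]
      conv_rhs => rw [pvGroups]
      rw [if_pos hd']
      simp
    · rename_i hd
      have hd' : PySem.Str.startswith tokens[i] "-" = false := by
        rw [← hget]; exact Bool.eq_false_iff.mpr hd
      rw [pvBOuter_eq, hdrop]
      conv_rhs => rw [pvGroups]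
      rw [if_neg (by rw [hd']; exact Bool.false_ne_true)]
  · rename_i hi
    rw [List.drop_eq_nil_of_le (by omega)]
    simp [pvGroups]
termination_by tokens.length - i
decreasing_by
  all_goals have := pvBInner_ge tokens tokens.length (i + 1)
  all_goals omega

-- ===== VERDICT (by name: the statement is the Claim_ definition above) =====
theorem split_common_param_variants_py_spec : Claim_equal_split_common_param_variants_py := by
  unfold Claim_equal_split_common_param_variants_py
  intro cell _
  unfold Spec_split_common_param_variants_py
  show pvFinal (((PySem.Str.split₀ (if cell == "" then "" else cell)).filter (fun t => t != "")).foldl pvStep ([], []))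
      = split_common_param_variants_py_alt cell
  rw [pvFilter_split, pvFoldA_empty]
  unfold split_common_param_variants_py_alt
  rw [pvBOuter_eq]
  simp
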